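-- pv_equiv track=rewrite | github.com/GowthamSagar310/CompetitiveProgramming | Leetcode/1609.py | solve
-- ===== SOURCE A (Python) =====
-- def is_increasing_and_odd(l):
--     if l[0] % 2 == 0: return False
--     for i in range(1, len(l)):
--         if l[i] % 2 == 0 or l[i] <= l[i-1]:
--             return False
--     return True
--
-- def is_decreasing_and_even(l):
--     if l[0] % 2: return False
--     for i in range(1, len(l)):
--         if l[i] % 2 or l[i] >= l[i-1]:
--             return False
--     return True
--
-- def solve(tree):
--     j = 1
--     index = 0
--     level = 0
--     while index < len(tree):
--         if level % 2:
--             if not is_decreasing_and_even(tree[index: index+j]):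
--                 return False
--         else:
--             if not is_increasing_and_odd(tree[index: index+j]):
--                 return False
--         index += j
--         j *= 2
--         level += 1
--     return True
-- ===== SOURCE B (Python) =====
-- def solve(tree):
--     level = 0
--     next_start = 1
--     prev = None
--     for i, x in enumerate(tree):
--         if i == next_start:
--             level += 1
--             next_start = 2 ** (level + 1) - 1
--             prev = None
--         if level % 2 == 0:
--             if x % 2 == 0:
--                 return False
--         else:
--             if x % 2 == 1:
--                 return False
--         if prev is not None:
--             if level % 2 == 0:
--                 if x <= prev:
--                     return False
--             else:
--                 if x >= prev:
--                     return False
--         prev = x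
--     return True
-- ===== Notes on version B (the rewrite author's own statement) =====
-- stated objective: simpler
-- what changed: Replaces the level-by-level loop with its slicing and the two per-level helper functions by one flat pass over all indices that tracks the current level, the next level boundary and the previous element.
import Mathlib
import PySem

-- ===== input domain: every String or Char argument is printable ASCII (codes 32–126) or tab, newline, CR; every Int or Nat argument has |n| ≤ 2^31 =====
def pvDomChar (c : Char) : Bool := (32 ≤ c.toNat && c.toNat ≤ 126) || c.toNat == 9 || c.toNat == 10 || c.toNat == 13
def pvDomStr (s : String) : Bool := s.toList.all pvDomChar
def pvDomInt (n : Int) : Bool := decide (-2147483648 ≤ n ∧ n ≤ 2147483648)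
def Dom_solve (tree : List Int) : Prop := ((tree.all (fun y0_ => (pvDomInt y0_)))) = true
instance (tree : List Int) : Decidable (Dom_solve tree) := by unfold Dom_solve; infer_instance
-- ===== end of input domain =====

-- B replaces the per-level slicing and the two helper functions by one flat pass
-- tracking level / next level boundary / previous element (simpler decomposition).

-- ===== PORT A =====
-- for-loop of is_increasing_and_odd, carrying prev = l[i-1]
def isIncAux (l : List Int) (p : Int) : Bool :=
  match l with
  | [] => true
  | x :: t => if PySem.Int.mod x 2 = 0 ∨ x ≤ p then false else isIncAux t x

-- l[0] on the empty list raises in Python; solve never calls it with [] (slice of a live index)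
def is_increasing_and_odd (l : List Int) : Bool :=
  match l with
  | [] => false
  | h :: t => if PySem.Int.mod h 2 = 0 then false else isIncAux t h

def isDecAux (l : List Int) (p : Int) : Bool :=
  match l with
  | [] => true
  | x :: t => if PySem.Int.mod x 2 ≠ 0 ∨ x ≥ p then false else isDecAux t x

def is_decreasing_and_even (l : List Int) : Bool :=
  match l with
  | [] => false
  | h :: t => if PySem.Int.mod h 2 ≠ 0 then false else isDecAux t h

-- the while loop of solve; hj records j > 0 (j starts at 1 and doubles) for termination
def solveLoopA (tree : List Int) (j index level : Nat) (hj : 0 < j) : Bool :=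
  if _h : index < tree.length then
    let seg := PySem.List.slice tree (some (index : Int)) (some ((index + j : Nat) : Int))
    if (if level % 2 = 1 then is_decreasing_and_even seg else is_increasing_and_odd seg) then
      solveLoopA tree (j * 2) (index + j) (level + 1) (by omega)
    else false
  else true
termination_by tree.length - index
decreasing_by omega

def solve (tree : List Int) : Bool := solveLoopA tree 1 0 0 (by omega)

-- ===== PORT B =====
-- flat loop over the remaining elements; i = current index, prev = previous element of the level
def altGo (xs : List Int) (i level nextStart : Nat) (prev : Option Int) : Bool :=
  match xs with
  | [] => true
  | x :: rest =>
    let st := if i = nextStart then (level + 1, 2 ^ (level + 2) - 1, (none : Option Int))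
              else (level, nextStart, prev)
    let lv := st.1
    let ns := st.2.1
    let pv := st.2.2
    if (if lv % 2 = 0 then PySem.Int.mod x 2 = 0 else PySem.Int.mod x 2 = 1) then false
    else
      match pv with
      | some p =>
          if (if lv % 2 = 0 then x ≤ p else x ≥ p) then false
          else altGo rest (i + 1) lv ns (some x)
      | none => altGo rest (i + 1) lv ns (some x)

def solve_alt (tree : List Int) : Bool := altGo tree 0 0 1 none

-- ===== PRECONDITION & SPEC =====
def Spec_solve (tree : List Int) (out : Bool) : Prop := out = solve_alt tree
instance (tree : List Int) (out : Bool) : Decidable (Spec_solve tree out) := by unfold Spec_solve; infer_instance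

-- ===== CLAIM (what is proved, stated in full; the proofs are below) =====
def Claim_equal_solve : Prop := ∀ (tree : List Int), Dom_solve tree → Spec_solve tree (solve tree)

-- ===== LEMMAS AND PROOFS =====

-- common reference predicate: check one level's chain with previous element pv
def chain (lv : Nat) (pv : Option Int) (seg : List Int) : Bool :=
  match seg with
  | [] => true
  | x :: t =>
    if (if lv % 2 = 0 then PySem.Int.mod x 2 = 0 else PySem.Int.mod x 2 = 1) then false
    else
      match pv with
      | some p => if (if lv % 2 = 0 then x ≤ p else x ≥ p) then false else chain lv (some x) t
      | none => chain lv (some x) t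

-- level-by-level reference
def Aref (xs : List Int) (lv : Nat) : Bool :=
  if _h : xs = [] then true
  else if chain lv none (xs.take (2 ^ lv)) then Aref (xs.drop (2 ^ lv)) (lv + 1) else false
termination_by xs.length
decreasing_by
  have h1 : 0 < 2 ^ lv := Nat.two_pow_pos _
  have h2 : 0 < xs.length := List.length_pos_of_ne_nil _h
  simp only [List.length_drop]; omega

theorem mod_two_cases (x : Int) : PySem.Int.mod x 2 = 0 ∨ PySem.Int.mod x 2 = 1 := by
  have h0 := PySem.Int.mod_nonneg x (b := 2) (by omega)
  have h1 := PySem.Int.mod_lt x (b := 2) (by omega)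
  omega

theorem chain_cons_none (lv : Nat) (x : Int) (t : List Int) :
    chain lv none (x :: t)
      = if (if lv % 2 = 0 then PySem.Int.mod x 2 = 0 else PySem.Int.mod x 2 = 1) then false
        else chain lv (some x) t := rfl

theorem chain_cons_some (lv : Nat) (p x : Int) (t : List Int) :
    chain lv (some p) (x :: t)
      = if (if lv % 2 = 0 then PySem.Int.mod x 2 = 0 else PySem.Int.mod x 2 = 1) then false
        else if (if lv % 2 = 0 then x ≤ p else x ≥ p) then false
        else chain lv (some x) t := rfl

theorem altGo_cons_none (x : Int) (rest : List Int) (i lv ns : Nat) (hne : i ≠ ns) :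
    altGo (x :: rest) i lv ns none
      = if (if lv % 2 = 0 then PySem.Int.mod x 2 = 0 else PySem.Int.mod x 2 = 1) then false
        else altGo rest (i + 1) lv ns (some x) := by
  simp only [altGo, hne, reduceIte]

theorem altGo_cons_some (x : Int) (rest : List Int) (i lv ns : Nat) (p : Int) (hne : i ≠ ns) :
    altGo (x :: rest) i lv ns (some p)
      = if (if lv % 2 = 0 then PySem.Int.mod x 2 = 0 else PySem.Int.mod x 2 = 1) then false
        else if (if lv % 2 = 0 then x ≤ p else x ≥ p) then false
        else altGo rest (i + 1) lv ns (some x) := by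
  simp only [altGo, hne, reduceIte]

theorem isIncAux_eq_chain (t : List Int) (p : Int) (lv : Nat) (h : lv % 2 = 0) :
    isIncAux t p = chain lv (some p) t := by
  induction t generalizing p with
  | nil => rfl
  | cons x rest ih =>
    rw [isIncAux, chain_cons_some]
    simp only [h, reduceIte]
    by_cases h1 : PySem.Int.mod x 2 = 0 <;> by_cases h2 : x ≤ p <;>
      simp [h2, ih]

theorem isDecAux_eq_chain (t : List Int) (p : Int) (lv : Nat) (h : lv % 2 = 1) :
    isDecAux t p = chain lv (some p) t := by
  induction t generalizing p with
  | nil => rfl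
  | cons x rest ih =>
    have hx := mod_two_cases x
    rw [isDecAux, chain_cons_some]
    have hone : lv % 2 = 0 ↔ False := by simp [h]
    simp only [hone, if_false]
    by_cases h1 : PySem.Int.mod x 2 = 1 <;> by_cases h2 : x ≥ p <;>
      simp [h2, ih]

theorem check_eq_chain (xs : List Int) (lv : Nat) (hne : xs ≠ []) :
    (if lv % 2 = 1 then is_decreasing_and_even xs else is_increasing_and_odd xs)
      = chain lv none xs := by
  match xs with
  | [] => exact absurd rfl hne
  | h :: t =>
    have hx := mod_two_cases h
    rcases Nat.mod_two_eq_zero_or_one lv with hl | hl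
    · have hl1 : ¬ lv % 2 = 1 := by omega
      rw [if_neg hl1, is_increasing_and_odd, chain_cons_none]
      simp only [hl, reduceIte]
      by_cases h1 : PySem.Int.mod h 2 = 0 <;> simp [isIncAux_eq_chain t h lv hl]
    · have hl0 : lv % 2 = 0 ↔ False := by simp [hl]
      rw [if_pos hl, is_decreasing_and_even, chain_cons_none]
      simp only [hl0, if_false]
      by_cases h1 : PySem.Int.mod h 2 = 1 <;>
        simp [isDecAux_eq_chain t h lv hl]

theorem solveLoopA_eq_Aref (n : Nat) : ∀ (tree : List Int) (index lv : Nat)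
    (hn : tree.length ≤ index + n),
    solveLoopA tree (2 ^ lv) index lv (Nat.two_pow_pos _)
      = Aref (tree.drop index) lv := by
  induction n with
  | zero =>
    intro tree index lv hn
    rw [solveLoopA, Aref]
    simp only [Nat.add_zero] at hn
    simp [Nat.not_lt.mpr hn, List.drop_eq_nil_of_le hn]
  | succ m ih =>
    intro tree index lv hn
    rw [solveLoopA, Aref]
    by_cases h : index < tree.length
    · have hpow : 0 < 2 ^ lv := Nat.two_pow_pos _
      have hdne : tree.drop index ≠ [] := by
        intro hc
        have := List.drop_eq_nil_iff.mp hc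
        omega
      have hslice : PySem.List.slice tree (some (index : Int)) (some ((index + 2 ^ lv : Nat) : Int))
          = (tree.drop index).take (2 ^ lv) := by
        have hcast : ((index + 2 ^ lv : Nat) : Int) = ((index : Nat) : Int) + ((2 ^ lv : Nat) : Int) := by
          push_cast; ring
        rw [hcast, PySem.List.slice_natCast_add]
      have hsegne : (tree.drop index).take (2 ^ lv) ≠ [] := by
        intro hc
        have := congrArg List.length hc
        simp only [List.length_take, List.length_drop, List.length_nil] at this
        omega
      simp only [h, dif_pos, hdne, dif_neg, not_false_iff, hslice]
      rw [check_eq_chain _ lv hsegne]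
      by_cases hc : chain lv none ((tree.drop index).take (2 ^ lv)) = true
      · simp only [hc, if_pos]
        have hstep : solveLoopA tree (2 ^ lv * 2) (index + 2 ^ lv) (lv + 1) (by positivity)
            = solveLoopA tree (2 ^ (lv + 1)) (index + 2 ^ lv) (lv + 1)
                (Nat.two_pow_pos _) := by
          congr 1
        rw [hstep, ih tree (index + 2 ^ lv) (lv + 1) (by omega)]
        rw [List.drop_drop]
      · simp [hc]
    · simp only [h, dif_neg, not_false_iff]
      have hnil : tree.drop index = [] := List.drop_eq_nil_of_le (by omega)
      simp [hnil]

-- at a level boundary the flat loop discards prev, so prev there is irrelevant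
theorem altGo_boundary_pv (xs : List Int) (lv ns : Nat) (pv pv' : Option Int) :
    altGo xs ns lv ns pv = altGo xs ns lv ns pv' := by
  cases xs with
  | nil => rfl
  | cons x rest => simp [altGo]

-- unrolling one whole level of the flat loop
theorem altGo_walk (k : Nat) : ∀ (xs : List Int) (i lv ns : Nat) (pv : Option Int),
    i + k = ns → 0 < k →
    altGo xs i lv ns pv
      = if chain lv pv (xs.take k) then altGo (xs.drop k) ns lv ns none else false := by
  induction k with
  | zero => intro _ _ _ _ _ _ hk; omega
  | succ m ih =>
    intro xs i lv ns pv hk _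
    cases xs with
    | nil => simp [altGo, chain]
    | cons x rest =>
      have hne : i ≠ ns := by omega
      rw [List.take_succ_cons, List.drop_succ_cons]
      have hcont : altGo rest (i + 1) lv ns (some x)
          = if chain lv (some x) (rest.take m) then altGo (rest.drop m) ns lv ns none
            else false := by
        rcases Nat.eq_zero_or_pos m with hm | hm
        · subst hm
          have hib : i + 1 = ns := by omega
          subst hib
          simp only [List.take_zero, List.drop_zero, chain, if_pos]
          exact altGo_boundary_pv rest lv (i + 1) (some x) none
        · exact ih rest (i + 1) lv ns (some x) (by omega) hm
      by_cases hpar : (if lv % 2 = 0 then PySem.Int.mod x 2 = 0 else PySem.Int.mod x 2 = 1)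
      · cases pv with
        | none =>
          rw [altGo_cons_none x rest i lv ns hne, chain_cons_none]
          simp only [if_pos hpar]
          simp
        | some p =>
          rw [altGo_cons_some x rest i lv ns p hne, chain_cons_some]
          simp only [if_pos hpar]
          simp
      · cases pv with
        | none =>
          rw [altGo_cons_none x rest i lv ns hne, chain_cons_none]
          simp only [if_neg hpar]
          rw [hcont]
        | some p =>
          rw [altGo_cons_some x rest i lv ns p hne, chain_cons_some]
          simp only [if_neg hpar]
          by_cases hord : (if lv % 2 = 0 then x ≤ p else x ≥ p)
          · simp only [if_pos hord]
            simp
          · simp only [if_neg hord]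
            rw [hcont]

theorem altGo_eq_Aref (n : Nat) : ∀ (xs : List Int) (lv : Nat), xs.length ≤ n →
    altGo xs (2 ^ lv - 1) lv (2 ^ (lv + 1) - 1) none = Aref xs lv := by
  induction n with
  | zero =>
    intro xs lv hn
    have hnil : xs = [] := List.eq_nil_of_length_eq_zero (by omega)
    subst hnil
    simp [altGo, Aref]
  | succ m ih =>
    intro xs lv hn
    by_cases hx : xs = []
    · subst hx; simp [altGo, Aref]
    · have hpow : 0 < 2 ^ lv := Nat.two_pow_pos _
      have hpow2 : 2 ^ (lv + 1) = 2 ^ lv * 2 := pow_succ 2 lv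
      have hk : (2 ^ lv - 1) + 2 ^ lv = 2 ^ (lv + 1) - 1 := by omega
      rw [altGo_walk (2 ^ lv) xs (2 ^ lv - 1) lv (2 ^ (lv + 1) - 1) none hk hpow,
        Aref]
      simp only [hx, dif_neg, not_false_iff]
      by_cases hc : chain lv none (xs.take (2 ^ lv)) = true
      · simp only [hc, if_pos]
        have hreset : altGo (xs.drop (2 ^ lv)) (2 ^ (lv + 1) - 1) lv (2 ^ (lv + 1) - 1) none
            = altGo (xs.drop (2 ^ lv)) (2 ^ (lv + 1) - 1) (lv + 1) (2 ^ (lv + 2) - 1) none := by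
          cases hd : xs.drop (2 ^ lv) with
          | nil => rfl
          | cons y ys =>
            have hp2 : 2 ^ (lv + 2) = 2 ^ (lv + 1) * 2 := pow_succ 2 (lv + 1)
            have hp1 : 0 < 2 ^ (lv + 1) := Nat.two_pow_pos _
            have hne2 : 2 ^ (lv + 1) - 1 ≠ 2 ^ (lv + 2) - 1 := by omega
            simp [altGo, hne2]
        rw [hreset]
        have hlen : (xs.drop (2 ^ lv)).length ≤ m := by
          have hlp : 0 < xs.length := List.length_pos_of_ne_nil hx
          simp only [List.length_drop]
          omega
        exact ih (xs.drop (2 ^ lv)) (lv + 1) hlen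
      · simp [hc]

-- ===== VERDICT (by name: the statement is the Claim_ definition above) =====
theorem solve_spec : Claim_equal_solve := by
  intro tree _
  unfold Spec_solve solve solve_alt
  have ha : solveLoopA tree 1 0 0 (by omega)
      = solveLoopA tree (2 ^ 0) 0 0 (Nat.two_pow_pos _) := rfl
  rw [ha, solveLoopA_eq_Aref tree.length tree 0 0 (by omega), List.drop_zero]
  have hb := altGo_eq_Aref tree.length tree 0 (le_refl _)
  simpa using hb.symm
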